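-- pv_equiv track=rewrite | github.com/MaksymilianFabian/Politechnika | PodstProgr/Zadanie dodatkowe.py | find_med
-- ===== SOURCE A (Python) =====
-- def find_med(list1):
--     if 0 in list1:
--         for i in range(list1.count(0)):
--                 list1.remove(0)
--     list1.sort()
--     if len(list1) % 2 !=0:
--         x = list1[len(list1)//2]
--     else:
--         x = list1[len(list1)//2-1]
--     return x
-- ===== SOURCE B (Python) =====
-- def _select(xs, k):
--     # quickselect: k-th smallest element of xs (0-based), middle element as pivot
--     p = xs[len(xs) // 2]
--     less = [v for v in xs if v < p]
--     eqs = [v for v in xs if v == p]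
--     if k < len(less):
--         return _select(less, k)
--     if k < len(less) + len(eqs):
--         return p
--     return _select([v for v in xs if v > p], k - len(less) - len(eqs))
--
-- def find_med(list1):
--     xs = [v for v in list1 if v != 0]
--     return _select(xs, (len(xs) - 1) // 2)
-- ===== Notes on version B (the rewrite author's own statement) =====
-- stated objective: alternative
-- what changed: B replaces A's remove-zeros loop + full in-place sort + index with a single-pass zero filter plus a three-way-partition quickselect (middle-element pivot) for the lower-median position k = (n-1)//2, never sorting the list; average cost O(n) but in pure Python it is not faster than A's C-level sort.
import Mathlib
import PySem

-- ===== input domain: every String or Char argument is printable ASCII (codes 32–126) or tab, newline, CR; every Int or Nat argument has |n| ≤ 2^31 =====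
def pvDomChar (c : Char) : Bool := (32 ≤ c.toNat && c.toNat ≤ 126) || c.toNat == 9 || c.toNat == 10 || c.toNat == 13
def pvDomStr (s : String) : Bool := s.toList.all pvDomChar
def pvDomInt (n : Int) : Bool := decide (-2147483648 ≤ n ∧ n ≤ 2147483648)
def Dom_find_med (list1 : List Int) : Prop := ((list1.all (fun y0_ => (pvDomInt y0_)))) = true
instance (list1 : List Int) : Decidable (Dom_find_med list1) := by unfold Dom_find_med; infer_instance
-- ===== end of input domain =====

-- B computes the lower median of the nonzero elements by a zero filter plus quickselect
-- instead of A's remove-loop + full sort; equivalence is about the RETURN value only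
-- (Python A mutates list1 in place — removes its zeros and sorts it — B does not).

-- ===== PORT A =====
def find_med (list1 : List Int) : Int :=
  -- if 0 in list1: for i in range(list1.count(0)): list1.remove(0)
  let l : List Int :=
    if 0 ∈ list1 then
      (PySem.List.pyRange 0 ((PySem.List.count list1 0 : Int)) 1).foldl
        (fun acc _ => ((PySem.List.remove? acc 0).getD acc)) list1
    else list1
  -- list1.sort()
  let l := PySem.List.sorted l (fun x => x) false
  -- the two pyGet? are in range under Pre_ (nonzero element exists); .getD 0 is the IndexError case
  if PySem.Int.mod (l.length : Int) 2 ≠ 0 then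
    (PySem.List.pyGet? l (PySem.Int.floordiv (l.length : Int) 2)).getD 0
  else
    (PySem.List.pyGet? l (PySem.Int.floordiv (l.length : Int) 2 - 1)).getD 0

-- ===== PORT B =====
-- p = xs[len(xs)//2], the pivot (.getD 0 is Python's IndexError on [], outside Pre_)
def pvPivot (xs : List Int) : Int :=
  (PySem.List.pyGet? xs (PySem.Int.floordiv ((xs.length : Nat) : Int) 2)).getD 0

-- the pivot of a nonempty list is one of its elements (used for termination)
theorem pvPivot_mem (x : Int) (t : List Int) : pvPivot (x :: t) ∈ (x :: t) := by
  unfold pvPivot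
  have h0 : (0:Int) ≤ PySem.Int.floordiv (((x :: t).length : Nat) : Int) 2 := by
    rw [PySem.Int.floordiv_eq_ediv_of_pos (by omega)]
    simp only [List.length_cons]
    omega
  have h1 : PySem.Int.floordiv (((x :: t).length : Nat) : Int) 2 < ((x :: t).length : Int) := by
    rw [PySem.Int.floordiv_eq_ediv_of_pos (by omega)]
    simp only [List.length_cons]
    omega
  rw [PySem.List.pyGet?_eq_some_getElem _ h0 h1]
  exact List.getElem_mem _

-- quickselect: k-th smallest of xs; the [] case is Python's IndexError at xs[len(xs)//2]
def pvSelect : List Int → Int → Int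
  | [], _ => 0
  | x :: t, k =>
    let p := pvPivot (x :: t)
    let less := (x :: t).filter (fun v => v < p)
    let eqs := (x :: t).filter (fun v => v == p)
    if k < (less.length : Int) then pvSelect less k
    else if k < (less.length : Int) + (eqs.length : Int) then p
    else pvSelect ((x :: t).filter (fun v => p < v)) (k - (less.length : Int) - (eqs.length : Int))
termination_by xs _ => xs.length
decreasing_by
  · refine List.length_filter_lt_length_iff_exists.mpr ⟨pvPivot (x :: t), pvPivot_mem x t, ?_⟩
    simp
  · refine List.length_filter_lt_length_iff_exists.mpr ⟨pvPivot (x :: t), pvPivot_mem x t, ?_⟩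
    simp

def find_med_alt (list1 : List Int) : Int :=
  let xs := list1.filter (fun v => v ≠ 0)
  pvSelect xs (PySem.Int.floordiv ((xs.length : Int) - 1) 2)

-- ===== PRECONDITION & SPEC =====
-- Pre_ excludes exactly the lists with no nonzero element, on which Python A raises
-- IndexError (the list is empty after zero removal); Python B raises IndexError there too.
def Pre_find_med (list1 : List Int) : Prop := ∃ v ∈ list1, v ≠ 0
instance (list1 : List Int) : Decidable (Pre_find_med list1) := by unfold Pre_find_med; infer_instance

def pvWitness_find_med : List Int := [3, 0, -1, 2]

def Spec_find_med (list1 : List Int) (out : Int) : Prop := out = find_med_alt list1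
instance (list1 : List Int) (out : Int) : Decidable (Spec_find_med list1 out) := by unfold Spec_find_med; infer_instance

-- ===== CLAIM (what is proved, stated in full; the proofs are below) =====
def Claim_equal_find_med : Prop := ∀ (list1 : List Int), Dom_find_med list1 → Pre_find_med list1 → Spec_find_med list1 (find_med list1)

-- ===== LEMMAS AND PROOFS =====

-- A's remove loop equals erasing 0 n times, which for n = count equals the zero filter
def pvEraseN : Nat → List Int → List Int
  | 0, l => l
  | n + 1, l => pvEraseN n (l.erase 0)

theorem pvEraseN_comm (n : Nat) (l : List Int) :
    pvEraseN n (l.erase 0) = (pvEraseN n l).erase 0 := by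
  induction n generalizing l with
  | zero => rfl
  | succ n ih => simp [pvEraseN, ih]

theorem remove_step (acc : List Int) :
    ((PySem.List.remove? acc 0).getD acc) = acc.erase 0 := by
  by_cases h : (0:Int) ∈ acc
  · rw [PySem.List.remove?_eq_some_erase acc 0 h]; rfl
  · rw [(PySem.List.remove?_eq_none_iff acc 0).mpr h]
    simp [List.erase_of_not_mem h]

theorem foldl_range_eraseN (n : Nat) (l : List Int) :
    (PySem.List.pyRange 0 (n : Int) 1).foldl
      (fun acc _ => ((PySem.List.remove? acc 0).getD acc)) l = pvEraseN n l := by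
  induction n generalizing l with
  | zero => simp [PySem.List.pyRange, pvEraseN]
  | succ n ih =>
    rw [show (((n+1:Nat)):Int) = (n:Int) + 1 by push_cast; ring]
    rw [PySem.List.pyRange_one_succ_right (by omega)]
    rw [List.foldl_append]
    simp only [List.foldl_cons, List.foldl_nil]
    rw [ih, remove_step, ← pvEraseN_comm]
    rfl

theorem eraseN_count (l : List Int) :
    pvEraseN (l.count 0) l = l.filter (fun v => v ≠ 0) := by
  induction l with
  | nil => rfl
  | cons a t ih =>
    by_cases h : a = 0
    · subst h
      simp only [List.count_cons_self, pvEraseN, List.erase_cons_head]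
      simpa using ih
    · have hc : (a :: t).count 0 = t.count 0 := by
        simp [h]
      have he : ∀ n (s : List Int), pvEraseN n (a :: s) = a :: pvEraseN n s := by
        intro n
        induction n with
        | zero => intro s; rfl
        | succ m ihm =>
          intro s
          have her : (a :: s).erase 0 = a :: s.erase 0 := by
            rw [List.erase_cons_tail]
            simpa using h
          simp only [pvEraseN, her]
          exact ihm _
      rw [hc, he]
      simp [h, ih]

-- elements of the three-way partition
theorem sorted_partition (p : Int) (xs : List Int) :
    PySem.List.sorted xs (fun x => x) false =
      PySem.List.sorted (xs.filter (fun v => v < p)) (fun x => x) false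
        ++ xs.filter (fun v => v == p)
        ++ PySem.List.sorted (xs.filter (fun v => p < v)) (fun x => x) false := by
  apply PySem.List.sorted_id_eq_of_perm_of_pairwise
  · -- permutation with xs
    have h1 : (xs.filter (fun v => decide (v < p)) ++ xs.filter (fun v => !decide (v < p))).Perm xs :=
      List.filter_append_perm _ xs
    have hsplit : ((xs.filter (fun v => !decide (v < p))).filter (fun v => v == p)
        ++ (xs.filter (fun v => !decide (v < p))).filter (fun v => !(v == p))).Perm
        (xs.filter (fun v => !decide (v < p))) :=
      List.filter_append_perm _ _
    have heq1 : (xs.filter (fun v => !decide (v < p))).filter (fun v => v == p)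
        = xs.filter (fun v => v == p) := by
      rw [List.filter_filter]
      apply List.filter_congr
      intro v _
      by_cases hv : v = p <;> simp [hv]
    have heq2 : (xs.filter (fun v => !decide (v < p))).filter (fun v => !(v == p))
        = xs.filter (fun v => decide (p < v)) := by
      rw [List.filter_filter]
      apply List.filter_congr
      intro v _
      by_cases hv : v = p
      · simp [hv]
      · rcases lt_trichotomy v p with h | h | h
        · simp [h, not_lt.mpr (le_of_lt h)]
        · exact absurd h hv
        · simp [h, not_lt.mpr (le_of_lt h), hv]
    rw [heq1, heq2] at hsplit
    have hsplit3 : (xs.filter (fun v => decide (v < p))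
        ++ (xs.filter (fun v => v == p) ++ xs.filter (fun v => decide (p < v)))).Perm xs :=
      (((List.Perm.refl _).append hsplit)).trans h1
    rw [List.append_assoc]
    exact ((PySem.List.sorted_perm _ _ _).append
      ((List.Perm.refl _).append (PySem.List.sorted_perm _ _ _))).trans hsplit3
  · -- pairwise ≤
    rw [List.pairwise_append, List.pairwise_append]
    refine ⟨⟨PySem.List.sorted_pairwise _ _, ?_, ?_⟩, PySem.List.sorted_pairwise _ _, ?_⟩
    · -- eqs pairwise: all its elements equal p
      apply List.pairwise_of_forall_mem_list
      intro a ha b hb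
      have ha' : a = p := by have := List.of_mem_filter ha; simpa using this
      have hb' : b = p := by have := List.of_mem_filter hb; simpa using this
      omega
    · intro a ha b hb
      have ha' : a < p := by
        have := List.of_mem_filter ((PySem.List.mem_sorted _ _ _ _).mp ha); simpa using this
      have hb' : b = p := by have := List.of_mem_filter hb; simpa using this
      omega
    · intro a ha b hb
      have ha' : a ≤ p := by
        rcases List.mem_append.mp ha with h | h
        · have := List.of_mem_filter ((PySem.List.mem_sorted _ _ _ _).mp h); simp at this; omega
        · have := List.of_mem_filter h; simp at this; omega
      have hb' : p < b := by
        have := List.of_mem_filter ((PySem.List.mem_sorted _ _ _ _).mp hb); simpa using this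
      omega

theorem eqs_all_p (p : Int) (xs : List Int) :
    ∀ v ∈ xs.filter (fun v => v == p), v = p := by
  intro v hv
  have := List.of_mem_filter hv
  simpa using this

-- quickselect returns the k-th element of the sorted list
theorem pvSelect_correct : ∀ (xs : List Int) (k : Int), 0 ≤ k → k < (xs.length : Int) →
    pvSelect xs k = (PySem.List.sorted xs (fun x => x) false).getD k.toNat 0 := by
  intro xs
  induction xs using (measure List.length).wf.induction with
  | _ xs ih =>
  intro k hk0 hklen
  match xs with
  | [] => exact absurd hklen (by simp; omega)
  | x :: t =>
    rw [pvSelect.eq_2]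
    have hlt_less : ((x :: t).filter (fun v => decide (v < pvPivot (x :: t)))).length
        < (x :: t).length :=
      List.length_filter_lt_length_iff_exists.mpr ⟨pvPivot (x :: t), pvPivot_mem x t, by simp⟩
    have hlt_gt : ((x :: t).filter (fun v => decide (pvPivot (x :: t) < v))).length
        < (x :: t).length :=
      List.length_filter_lt_length_iff_exists.mpr ⟨pvPivot (x :: t), pvPivot_mem x t, by simp⟩
    have hlen_total : (x :: t).length
        = ((x :: t).filter (fun v => decide (v < pvPivot (x :: t)))).length
          + ((x :: t).filter (fun v => v == pvPivot (x :: t))).length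
          + ((x :: t).filter (fun v => decide (pvPivot (x :: t) < v))).length := by
      have h := congrArg List.length (sorted_partition (pvPivot (x :: t)) (x :: t))
      simp only [PySem.List.length_sorted, List.length_append] at h
      omega
    rw [sorted_partition (pvPivot (x :: t)) (x :: t), List.append_assoc]
    split_ifs with h1 h2
    · -- k in the less part
      rw [List.getD_append _ _ _ _ (by simp only [PySem.List.length_sorted]; omega)]
      exact ih _ hlt_less k hk0 (by omega)
    · -- k in the eqs part
      rw [List.getD_append_right _ _ _ _ (by simp only [PySem.List.length_sorted]; omega)]
      rw [List.getD_append _ _ _ _ (by simp only [PySem.List.length_sorted]; omega)]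
      rw [List.getD_eq_getElem _ _ (by simp only [PySem.List.length_sorted]; omega)]
      exact (eqs_all_p (pvPivot (x :: t)) (x :: t) _ (List.getElem_mem _)).symm
    · -- k in the gt part
      rw [List.getD_append_right _ _ _ _ (by simp only [PySem.List.length_sorted]; omega)]
      rw [List.getD_append_right _ _ _ _ (by simp only [PySem.List.length_sorted]; omega)]
      rw [ih _ hlt_gt _ (by omega) (by omega)]
      congr 1
      simp only [PySem.List.length_sorted]
      omega

-- A's pre-sort list is exactly the zero filter
theorem find_med_prelist (list1 : List Int) :
    (if 0 ∈ list1 then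
      (PySem.List.pyRange 0 ((PySem.List.count list1 0 : Int)) 1).foldl
        (fun acc _ => ((PySem.List.remove? acc 0).getD acc)) list1
    else list1) = list1.filter (fun v => v ≠ 0) := by
  by_cases h : (0:Int) ∈ list1
  · rw [if_pos h]
    have : PySem.List.count list1 0 = list1.count 0 := rfl
    rw [this, foldl_range_eraseN, eraseN_count]
  · rw [if_neg h]
    symm
    apply List.filter_eq_self.mpr
    intro a ha
    simp
    rintro rfl
    exact h ha

-- ===== VERDICT (by name: the statement is the Claim_ definition above) =====
theorem find_med_spec : Claim_equal_find_med := by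
  intro list1 _ hpre
  obtain ⟨v, hv, hv0⟩ := hpre
  unfold Spec_find_med find_med find_med_alt
  rw [find_med_prelist]
  set xs := list1.filter (fun v => v ≠ 0) with hxs
  have hxs_ne : xs ≠ [] := by
    intro h
    have : v ∈ xs := List.mem_filter.mpr ⟨hv, by simpa using hv0⟩
    simp [h] at this
  have hn : 0 < xs.length := List.length_pos_iff.mpr hxs_ne
  set s := PySem.List.sorted xs (fun x => x) false with hs
  have hslen : s.length = xs.length := PySem.List.length_sorted _ _ _
  have hk0 : (0:Int) ≤ PySem.Int.floordiv ((xs.length : Int) - 1) 2 := by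
    rw [PySem.Int.floordiv_eq_ediv_of_pos (by omega)]
    omega
  have hklen : PySem.Int.floordiv ((xs.length : Int) - 1) 2 < (xs.length : Int) := by
    rw [PySem.Int.floordiv_eq_ediv_of_pos (by omega)]
    omega
  rw [pvSelect_correct xs _ hk0 hklen, ← hs]
  have hkval : (PySem.Int.floordiv ((xs.length : Int) - 1) 2).toNat = (xs.length - 1) / 2 := by
    rw [PySem.Int.floordiv_eq_ediv_of_pos (by omega)]
    omega
  rw [hkval]
  have hmod : PySem.Int.mod (s.length : Int) 2 = (s.length : Int) % 2 :=
    PySem.Int.mod_eq_emod_of_pos (by omega)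
  have hdiv : PySem.Int.floordiv (s.length : Int) 2 = (s.length : Int) / 2 :=
    PySem.Int.floordiv_eq_ediv_of_pos (by omega)
  by_cases hpar : PySem.Int.mod (s.length : Int) 2 ≠ 0
  · rw [if_pos hpar, hdiv]
    have hidx : ((s.length : Int) / 2) = (((xs.length - 1) / 2 : Nat) : Int) := by
      rw [hslen]
      rw [hmod, hslen] at hpar
      omega
    rw [hidx, PySem.List.pyGet?_natCast]
    rw [List.getD_eq_getElem?_getD]
  · rw [if_neg hpar, hdiv]
    have hidx : ((s.length : Int) / 2 - 1) = (((xs.length - 1) / 2 : Nat) : Int) := by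
      rw [hslen]
      rw [hmod, hslen] at hpar
      omega
    rw [hidx, PySem.List.pyGet?_natCast]
    rw [List.getD_eq_getElem?_getD]
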